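-- pv_equiv track=rewrite | github.com/hzambenedetti/line_coding | decode.py | decode_hdb3
-- ===== SOURCE A (Python) =====
-- def decode_hdb3(encoded_string):
--     binary_list = ['']*len(encoded_string)
--     last_polarity = None
--
--     for i, char in enumerate(encoded_string):
--         # '+' or '-' char
--         if char != '0':
--             # repeated polarity == 4 zeros sequence
--             if char == last_polarity:
--                 #detect B00V type sequence
--                 if binary_list[i-3] != '0':
--                     binary_list[i-3] = '0'
--                 # 000V type sequence
--                 binary_list[i] = '0'
--             else:
--                 binary_list[i] = '1'
--             last_polarity = char
--         # '0' char
--         else: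
--             binary_list[i] = '0'
--
--     return ''.join(binary_list)
-- ===== SOURCE B (Python) =====
-- def decode_hdb3(encoded_string):
--     # Phase 1: violation bitmap — a pulse repeating the previous pulse's polarity.
--     viol = []
--     last = None
--     for ch in encoded_string:
--         if ch != '0':
--             viol.append(ch == last)
--             last = ch
--         else:
--             viol.append(False)
--     # Phase 2: pointwise rule with lookahead: '1' iff pulse, not a violation,
--     # and not the balancing pulse three places before a violation.
--     n = len(encoded_string)
--     return ''.join(
--         '1' if ch != '0' and not viol[j] and not (j + 3 < n and viol[j + 3]) else '0'
--         for j, ch in enumerate(encoded_string))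
-- ===== Notes on version B (the rewrite author's own statement) =====
-- stated objective: alternative
-- what changed: B replaces A's in-place back-patching pass (mutating the cell three back when a violation is met) by a declarative two-phase algorithm: it first computes a violation bitmap, then defines every output bit pointwise with a lookahead (position j is '1' iff it is a pulse, not a violation, and position j+3 is not a violation) — no write is ever revisited.
-- intended difference: On the two-symbol equal-pulse strings such as '++', A's negative-index write binary_list[i-3] wraps onto the already-decoded first cell so A zeroes both output bits, while B keeps the first bit as a pulse followed by a zeroed violation bit, the intended decoding of a pulse followed by a violation pulse. — e.g. on decode_hdb3("++"): A returns "00", B returns "10"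
import Mathlib
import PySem

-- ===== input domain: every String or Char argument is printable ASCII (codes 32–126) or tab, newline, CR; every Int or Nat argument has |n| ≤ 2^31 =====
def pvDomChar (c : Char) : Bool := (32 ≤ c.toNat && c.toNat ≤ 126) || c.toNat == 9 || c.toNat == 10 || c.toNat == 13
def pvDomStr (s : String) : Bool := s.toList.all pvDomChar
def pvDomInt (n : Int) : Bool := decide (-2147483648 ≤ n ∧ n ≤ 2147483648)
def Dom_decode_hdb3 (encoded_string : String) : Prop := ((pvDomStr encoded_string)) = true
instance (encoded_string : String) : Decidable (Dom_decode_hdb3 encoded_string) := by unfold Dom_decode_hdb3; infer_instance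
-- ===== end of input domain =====

-- B computes a violation bitmap and then defines every output bit pointwise with a lookahead (no back-patching);
-- on the two length-2 equal-pulse inputs A's negative-index wraparound zeroes the first pulse and B returns the intended value.

-- ===== PORT A =====
-- Python's list of one-char strings is modelled as List Char; the '' placeholder is the char ' '
-- (it is only ever compared against '0' and every cell is overwritten before the final join).
-- binary_list[i-3] is read/written with the PySem wrap-around primitives (always in range when reached).
def decode_hdb3_step (st : List Char × Option Char) (p : Int × Char) : List Char × Option Char :=
  match st, p with
  | (bl, last), (i, ch) =>
    if ch ≠ '0' then
      if some ch = last then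
        let bl1 := if PySem.List.pyGetD bl (i - 3) ' ' ≠ '0'
                   then PySem.List.pySetD bl (i - 3) '0' else bl
        (PySem.List.pySetD bl1 i '0', some ch)
      else
        (PySem.List.pySetD bl i '1', some ch)
    else
      (PySem.List.pySetD bl i '0', last)

def decode_hdb3 (encoded_string : String) : String :=
  String.ofList ((PySem.List.enumerate encoded_string.toList 0).foldl decode_hdb3_step
    (List.replicate encoded_string.toList.length ' ', none)).1

-- ===== PORT B =====
-- Phase 1: violation bitmap — a pulse repeating the previous pulse's polarity (state: bitmap, last).
def decode_hdb3_alt_viol_step (st : List Bool × Option Char) (ch : Char) : List Bool × Option Char :=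
  if ch ≠ '0' then (st.1 ++ [decide (some ch = st.2)], some ch)
  else (st.1 ++ [false], st.2)

-- Phase 2: pointwise rule with lookahead: '1' iff pulse, not a violation, and not three before a violation.
def decode_hdb3_alt (encoded_string : String) : String :=
  let s := encoded_string.toList
  let viol := (s.foldl decode_hdb3_alt_viol_step ([], none)).1
  let n : Int := s.length
  String.ofList ((PySem.List.enumerate s 0).map (fun p =>
    if p.2 ≠ '0' ∧ PySem.List.pyGetD viol p.1 false = false ∧
       ¬ (p.1 + 3 < n ∧ PySem.List.pyGetD viol (p.1 + 3) false = true)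
    then '1' else '0'))

-- ===== PRECONDITION & SPEC =====
-- On exactly the two-symbol equal-pulse strings such as "++", A's negative-index write binary_list[i-3]
-- wraps onto the already-decoded first cell so A zeroes both output bits; B keeps the first bit as a
-- pulse followed by a zeroed violation bit, the intended decoding of a pulse followed by a violation pulse.
def D_decode_hdb3 (encoded_string : String) : Prop :=
  encoded_string.toList.length = 2 ∧
  encoded_string.toList[0]? = encoded_string.toList[1]? ∧
  encoded_string.toList[0]? ≠ some '0'
instance (encoded_string : String) : Decidable (D_decode_hdb3 encoded_string) := by
  unfold D_decode_hdb3; infer_instance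

def Spec_decode_hdb3 (encoded_string : String) (out : String) : Prop :=
  ¬ D_decode_hdb3 encoded_string → out = decode_hdb3_alt encoded_string
instance (encoded_string : String) (out : String) : Decidable (Spec_decode_hdb3 encoded_string out) := by
  unfold Spec_decode_hdb3; infer_instance

def pvDiffWitness_decode_hdb3 : String := "++"
def pvDiffWitnessOut_decode_hdb3 : String × String := ("00", "10")

-- ===== CLAIM (what is proved, stated in full; the proofs are below) =====
def Claim_unchanged_decode_hdb3 : Prop := ∀ (encoded_string : String), Dom_decode_hdb3 encoded_string → Spec_decode_hdb3 encoded_string (decode_hdb3 encoded_string)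
def Claim_changed_decode_hdb3 : Prop := Dom_decode_hdb3 (pvDiffWitness_decode_hdb3) ∧ D_decode_hdb3 (pvDiffWitness_decode_hdb3) ∧ decode_hdb3 (pvDiffWitness_decode_hdb3) = pvDiffWitnessOut_decode_hdb3.1 ∧ decode_hdb3_alt (pvDiffWitness_decode_hdb3) = pvDiffWitnessOut_decode_hdb3.2 ∧ pvDiffWitnessOut_decode_hdb3.1 ≠ pvDiffWitnessOut_decode_hdb3.2
def Claim_exact_decode_hdb3 : Prop := ∀ (encoded_string : String), Dom_decode_hdb3 encoded_string → D_decode_hdb3 encoded_string → decode_hdb3 encoded_string ≠ decode_hdb3_alt encoded_string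

-- ===== LEMMAS AND PROOFS =====

-- Proof-side normal form of A: a (chars, violation-index) pass followed by a fix-up pass.
def pvPass1 : List (Int × Char) → Option Char → List Char × List Int × Option Char
  | [], last => ([], [], last)
  | (i, ch) :: rest, last =>
    if ch ≠ '0' then
      if some ch = last then
        let r := pvPass1 rest (some ch); ('0' :: r.1, i :: r.2.1, r.2.2)
      else
        let r := pvPass1 rest (some ch); ('1' :: r.1, r.2.1, r.2.2)
    else
      let r := pvPass1 rest last; ('0' :: r.1, r.2.1, r.2.2)

def pvFixes (viol : List Int) (out : List Char) : List Char :=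
  viol.foldl (fun o i => if 3 ≤ i then PySem.List.pySetD o (i - 3) '0' else o) out

-- Recursive normal form of B's violation bitmap.
def pvViol : List Char → Option Char → List Bool
  | [], _ => []
  | c :: r, last =>
    if c ≠ '0' then decide (some c = last) :: pvViol r (some c)
    else false :: pvViol r last

theorem pvViol_length (s : List Char) : ∀ last, (pvViol s last).length = s.length := by
  induction s with
  | nil => intro last; rfl
  | cons c r ih => intro last; simp only [pvViol]; split <;> simp [ih]

theorem pvViolFold_eq (s : List Char) : ∀ (acc : List Bool) (last : Option Char),
    (s.foldl decode_hdb3_alt_viol_step (acc, last)).1 = acc ++ pvViol s last := by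
  induction s with
  | nil => intro acc last; simp [pvViol]
  | cons c r ih =>
    intro acc last
    simp only [List.foldl_cons, decode_hdb3_alt_viol_step, pvViol]
    split <;> simp [ih]

theorem pvPass1_chars (s : List Char) : ∀ (k : Int) (last : Option Char),
    (pvPass1 (PySem.List.enumerate s k) last).1
      = List.zipWith (fun c v => if c ≠ '0' ∧ v = false then '1' else '0') s (pvViol s last) := by
  induction s with
  | nil => intro k last; simp [pvPass1, PySem.List.enumerate_nil]
  | cons c r ih =>
    intro k last
    rw [PySem.List.enumerate_cons]
    simp only [pvPass1, pvViol]
    by_cases hc : c ≠ '0'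
    · rw [if_pos hc, if_pos hc]
      by_cases hp : some c = last
      · simp [hp, ih, hc]
      · simp [hp, ih, hc]
    · rw [if_neg hc, if_neg hc]
      simp only [ne_eq, not_not] at hc
      simp [ih, hc]

theorem pvPass1_viol_mem (s : List Char) : ∀ (k : Int) (last : Option Char) (j : Int),
    j ∈ (pvPass1 (PySem.List.enumerate s k) last).2.1
      ↔ ∃ m : Nat, m < s.length ∧ j = k + m ∧ (pvViol s last)[m]? = some true := by
  induction s with
  | nil => intro k last j; simp [pvPass1, PySem.List.enumerate_nil]
  | cons c r ih =>
    intro k last j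
    rw [PySem.List.enumerate_cons]
    simp only [pvPass1, pvViol]
    by_cases hc : c ≠ '0'
    · rw [if_pos hc, if_pos hc]
      by_cases hp : some c = last
      · rw [if_pos hp]
        simp only [List.mem_cons, ih]
        constructor
        · rintro (rfl | ⟨m, hm, rfl, hv⟩)
          · exact ⟨0, by simp [hp]⟩
          · exact ⟨m + 1, by simpa using hm, by push_cast; ring, by simpa using hv⟩
        · rintro ⟨m, hm, rfl, hv⟩
          match m with
          | 0 => left; simp
          | m + 1 =>
            right
            refine ⟨m, by simpa using hm, by push_cast; ring, by simpa using hv⟩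
      · rw [if_neg hp]
        simp only [ih]
        constructor
        · rintro ⟨m, hm, rfl, hv⟩
          exact ⟨m + 1, by simpa using hm, by push_cast; ring, by simpa using hv⟩
        · rintro ⟨m, hm, rfl, hv⟩
          match m with
          | 0 => simp [hp] at hv
          | m + 1 =>
            refine ⟨m, by simpa using hm, by push_cast; ring, by simpa using hv⟩
    · rw [if_neg hc, if_neg hc]
      simp only [ih]
      constructor
      · rintro ⟨m, hm, rfl, hv⟩
        exact ⟨m + 1, by simpa using hm, by push_cast; ring, by simpa using hv⟩
      · rintro ⟨m, hm, rfl, hv⟩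
        match m with
        | 0 => simp at hv
        | m + 1 =>
          refine ⟨m, by simpa using hm, by push_cast; ring, by simpa using hv⟩

theorem pvFixes_getElem? (vs : List Int) : ∀ (o : List Char) (j : Nat),
    (∀ v ∈ vs, v < (o.length : Int)) →
    (pvFixes vs o)[j]? = if ((j : Int) + 3) ∈ vs then some '0' else o[j]? := by
  induction vs with
  | nil => intro o j _; simp [pvFixes]
  | cons v vs ih =>
    intro o j hb
    simp only [pvFixes, List.foldl_cons] at *
    by_cases h3 : 3 ≤ v
    · rw [if_pos h3]
      have hv : v < (o.length : Int) := hb v (List.mem_cons_self)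
      rw [PySem.List.pySetD_of_nonneg _ _ (by omega)]
      rw [ih (o.set (v - 3).toNat '0') j (by
        intro w hw
        have := hb w (List.mem_cons_of_mem _ hw)
        simpa using this)]
      by_cases hmem : ((j : Int) + 3) ∈ vs
      · simp [hmem]
      · rw [if_neg hmem]
        by_cases hjv : (j : Int) + 3 = v
        · rw [if_pos (by simp [hjv])]
          have hjl : j < o.length := by omega
          have : (v - 3).toNat = j := by omega
          rw [this, List.getElem?_set_self hjl]
        · rw [if_neg (by simp [hjv, hmem])]
          rw [List.getElem?_set_ne (by omega)]
    · rw [if_neg h3]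
      rw [ih o j (fun w hw => hb w (List.mem_cons_of_mem _ hw))]
      by_cases hmem : ((j : Int) + 3) ∈ vs
      · simp [hmem]
      · rw [if_neg hmem, if_neg (by
          simp only [List.mem_cons, hmem, or_false]
          omega)]

theorem pvSetD_neg (xs : List Char) (i : Int) (v : Char) (h : -xs.length ≤ i) (h2 : i < 0) :
    PySem.List.pySetD xs i v = xs.set (xs.length + i).toNat v := by
  simp only [PySem.List.pySetD, PySem.List.pySet?, PySem.List.pyIdx?]
  rw [if_neg (show ¬ 0 ≤ i by omega), if_pos h]
  simp only [Option.map_some, Option.getD_some]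
  congr 1
  omega

theorem pvIdx_in (n : Nat) (j : Int) (h1 : -n ≤ j) (h2 : j < n) :
    ∃ w, PySem.List.pyIdx? n j = some w ∧ w < n := by
  unfold PySem.List.pyIdx?
  by_cases h3 : 0 ≤ j
  · rw [if_pos h3, if_pos h2]
    exact ⟨j.toNat, rfl, by omega⟩
  · rw [if_neg h3, if_pos h1]
    exact ⟨n - (-j).toNat, rfl, by omega⟩

theorem pvTakeSet (xs : List Char) (k : Nat) (c : Char) (h : k < xs.length) :
    (xs.set k c).take (k + 1) = xs.take k ++ [c] := by
  rw [List.take_set, List.take_add_one, List.getElem?_eq_getElem h, Option.toList_some,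
    List.set_append_right _ _ (by simp [Nat.min_eq_left (le_of_lt h)])]
  congr 1
  simp [Nat.min_eq_left (le_of_lt h)]

theorem pvCondFix (bl : List Char) (j : Int) (h : -bl.length ≤ j) (h2 : j < bl.length) :
    (if PySem.List.pyGetD bl j ' ' ≠ '0' then PySem.List.pySetD bl j '0' else bl)
      = PySem.List.pySetD bl j '0' := by
  obtain ⟨w, hw, hwlt⟩ := pvIdx_in bl.length j h h2
  split
  · rfl
  · rename_i hg
    simp only [ne_eq, not_not, PySem.List.pyGetD, PySem.List.pyGet?, hw, Option.bind_some,
      List.getElem?_eq_getElem hwlt, Option.getD_some] at hg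
    simp only [PySem.List.pySetD, PySem.List.pySet?, hw, Option.map_some, Option.getD_some]
    rw [← hg, List.set_getElem_self]

-- Invariant relating A's single interleaved pass, started mid-string, to the two-stage normal form.
theorem pvLoopA_eq (rest : List Char) : ∀ (k : Nat) (blA : List Char) (last : Option Char),
    blA.length = k + rest.length → 3 ≤ blA.length →
    ((PySem.List.enumerate rest (k : Int)).foldl decode_hdb3_step (blA, last)).1
      = pvFixes (pvPass1 (PySem.List.enumerate rest (k : Int)) last).2.1
          (blA.take k ++ (pvPass1 (PySem.List.enumerate rest (k : Int)) last).1) := by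
  induction rest with
  | nil =>
    intro k blA last hlen _
    have hk : blA.length ≤ k := by simp at hlen; omega
    simp [pvPass1, pvFixes, List.take_of_length_le hk]
  | cons ch rest ih =>
    intro k blA last hlen h3
    have hk : k < blA.length := by simp at hlen ⊢; omega
    simp only [List.length_cons] at hlen
    rw [PySem.List.enumerate_cons, show ((k : Int) + 1) = ((k + 1 : Nat) : Int) by push_cast; ring]
    simp only [List.foldl_cons, decode_hdb3_step, pvPass1]
    by_cases hch : ch ≠ '0'
    · rw [if_pos hch, if_pos hch]
      by_cases hpol : some ch = last
      · -- violation
        rw [if_pos hpol, if_pos hpol,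
          pvCondFix blA ((k : Int) - 3) (by omega) (by omega)]
        by_cases hk3 : 3 ≤ k
        · -- fix lands at k-3, inside the already-decoded prefix
          rw [show (k : Int) - 3 = ((k - 3 : Nat) : Int) by omega, PySem.List.pySetD_natCast,
            PySem.List.pySetD_natCast,
            ih (k + 1) ((blA.set (k - 3) '0').set k '0') (some ch)
              (by simp only [List.length_set]; omega) (by simp only [List.length_set]; omega),
            pvTakeSet (blA.set (k - 3) '0') k '0' (by simp only [List.length_set]; omega),
            List.take_set]
          simp only [pvFixes, List.foldl_cons]
          rw [if_pos (show (3 : Int) ≤ (k : Int) by exact_mod_cast hk3),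
            show (k : Int) - 3 = ((k - 3 : Nat) : Int) by omega, PySem.List.pySetD_natCast,
            List.set_append_left _ _ (by simp [Nat.min_eq_left (le_of_lt hk)]; omega)]
          simp [List.append_assoc]
        · -- fix wraps past the cursor and is later overwritten
          rw [pvSetD_neg blA ((k : Int) - 3) '0' (by omega) (by omega),
            PySem.List.pySetD_natCast,
            ih (k + 1) (((blA.set (blA.length + ((k : Int) - 3)).toNat '0')).set k '0') (some ch)
              (by simp only [List.length_set]; omega) (by simp only [List.length_set]; omega),
            pvTakeSet _ k '0' (by simp only [List.length_set]; omega),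
            List.take_set_of_le (by omega)]
          simp only [pvFixes, List.foldl_cons]
          rw [if_neg (show ¬ (3 : Int) ≤ (k : Int) by exact_mod_cast hk3)]
          simp [List.append_assoc]
      · -- pulse with new polarity
        rw [if_neg hpol, if_neg hpol, PySem.List.pySetD_natCast,
          ih (k + 1) (blA.set k '1') (some ch)
            (by simp only [List.length_set]; omega) (by simp only [List.length_set]; omega),
          pvTakeSet blA k '1' hk]
        simp [pvFixes, List.append_assoc]
    · -- '0' symbol
      rw [if_neg hch, if_neg hch, PySem.List.pySetD_natCast,
        ih (k + 1) (blA.set k '0') last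
          (by simp only [List.length_set]; omega) (by simp only [List.length_set]; omega),
        pvTakeSet blA k '0' hk]
      simp [pvFixes, List.append_assoc]

-- ===== VERDICT (by name: the statement is the Claim_ definition above) =====
theorem pvZip_get (l : List Char) (b : List Bool) (f : Char → Bool → Char) (j : Nat)
    (hj : j < l.length) (hb : j < b.length) :
    (List.zipWith f l b)[j]? = some (f l[j] b[j]) := by
  rw [List.getElem?_eq_getElem (by simp; omega)]
  simp

theorem decode_hdb3_spec : Claim_unchanged_decode_hdb3 := by
  intro s _ hD
  by_cases h3 : 3 ≤ s.toList.length
  · simp only [decode_hdb3, decode_hdb3_alt]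
    apply congrArg String.ofList
    rw [show (0 : Int) = ((0 : Nat) : Int) from rfl,
      pvLoopA_eq s.toList 0 (List.replicate s.toList.length ' ') none
        (by rw [List.length_replicate]; omega) (by rw [List.length_replicate]; omega)]
    simp only [List.take_zero, List.nil_append, pvPass1_chars, pvViolFold_eq]
    have hvlen : (pvViol s.toList none).length = s.toList.length := pvViol_length s.toList none
    have hVmem : ∀ j : Int, (j ∈ (pvPass1 (PySem.List.enumerate s.toList ((0:Nat):Int)) none).2.1
        ↔ ∃ m : Nat, m < s.toList.length ∧ j = m ∧ (pvViol s.toList none)[m]? = some true) := by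
      intro j
      rw [pvPass1_viol_mem]
      simp
    apply List.ext_getElem?
    intro j
    rw [pvFixes_getElem? _ _ j (by
      intro v hv
      obtain ⟨m, hm, rfl, -⟩ := (hVmem v).1 hv
      simp only [List.length_zipWith, hvlen, Nat.min_self]
      omega),
      List.getElem?_map, PySem.List.getElem?_enumerate]
    by_cases hj : j < s.toList.length
    · rw [List.getElem?_eq_getElem hj, pvZip_get _ _ _ j hj (by omega)]
      simp only [Option.map_some]
      have hmem : (((j:Int) + 3) ∈ (pvPass1 (PySem.List.enumerate s.toList ((0:Nat):Int)) none).2.1)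
          ↔ (j + 3 < s.toList.length ∧ (pvViol s.toList none).getD (j+3) false = true) := by
        rw [hVmem]
        constructor
        · rintro ⟨m, hm, he, hv⟩
          have : m = j + 3 := by omega
          subst this
          exact ⟨hm, by rw [List.getD_eq_getElem?_getD, hv]; rfl⟩
        · rintro ⟨h1, h2⟩
          refine ⟨j + 3, h1, by push_cast; ring, ?_⟩
          rw [List.getD_eq_getElem?_getD, List.getElem?_eq_getElem (by omega)] at h2
          rw [List.getElem?_eq_getElem (by omega)]
          simpa using h2
      by_cases hP : j + 3 < s.toList.length ∧ (pvViol s.toList none).getD (j+3) false = true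
      · rw [if_pos (hmem.2 hP)]
        have hng : ¬ (s.toList[j] ≠ '0' ∧ PySem.List.pyGetD (pvViol s.toList none) (((0:Nat):Int) + j) false = false ∧
            ¬ (((0:Nat):Int) + j + 3 < (s.toList.length : Int) ∧
               PySem.List.pyGetD (pvViol s.toList none) (((0:Nat):Int) + j + 3) false = true)) := by
          rintro ⟨-, -, hno⟩
          apply hno
          refine ⟨by push_cast; omega, ?_⟩
          rw [show ((0:Nat):Int) + j + 3 = ((j + 3 : Nat) : Int) by push_cast; ring,
            PySem.List.pyGetD_natCast]
          exact hP.2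
        rw [if_neg hng]
      · rw [if_neg (fun h => hP (hmem.1 h))]
        have hq : (((0:Nat):Int) + j + 3 < (s.toList.length : Int) ∧
            PySem.List.pyGetD (pvViol s.toList none) (((0:Nat):Int) + j + 3) false = true)
            ↔ (j + 3 < s.toList.length ∧ (pvViol s.toList none).getD (j+3) false = true) := by
          rw [show ((0:Nat):Int) + j + 3 = ((j + 3 : Nat) : Int) by push_cast; ring,
            PySem.List.pyGetD_natCast]
          constructor
          · rintro ⟨h1, h2⟩
            exact ⟨by exact_mod_cast h1, h2⟩
          · rintro ⟨h1, h2⟩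
            exact ⟨by exact_mod_cast h1, h2⟩
        have hg : PySem.List.pyGetD (pvViol s.toList none) (((0:Nat):Int) + j) false
            = (pvViol s.toList none)[j]'(by omega) := by
          rw [show ((0:Nat):Int) + j = ((j:Nat):Int) by push_cast; ring, PySem.List.pyGetD_natCast,
            List.getD_eq_getElem?_getD, List.getElem?_eq_getElem (by omega)]
          rfl
        congr 1
        rw [hg]
        by_cases hc : s.toList[j] ≠ '0' ∧ (pvViol s.toList none)[j]'(by omega) = false
        · rw [if_pos hc, if_pos ⟨hc.1, hc.2, fun h => hP (hq.1 h)⟩]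
        · rw [if_neg hc, if_neg (fun hw => hc ⟨hw.1, hw.2.1⟩)]
    · rw [if_neg (fun h => by
        obtain ⟨m, hm, he, -⟩ := (hVmem _).1 h
        omega),
        List.getElem?_eq_none (by simp only [List.length_zipWith, hvlen, Nat.min_self]; omega),
        List.getElem?_eq_none (by omega)]
      rfl
  · rcases hl : s.toList with _ | ⟨a, _ | ⟨b, _ | ⟨c, t⟩⟩⟩
    · simp [decode_hdb3, decode_hdb3_alt, hl, PySem.List.enumerate_nil]
    · by_cases ha : a = '0' <;>
        simp [decode_hdb3, decode_hdb3_alt, hl, ha, PySem.List.enumerate_cons,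
          PySem.List.enumerate_nil, decode_hdb3_step, decode_hdb3_alt_viol_step,
          PySem.List.pySetD, PySem.List.pySet?, PySem.List.pyIdx?,
          PySem.List.pyGetD, PySem.List.pyGet?]
    · by_cases hviol : a ≠ '0' ∧ b = a
      · exfalso
        apply hD
        refine ⟨by rw [hl]; rfl, ?_, ?_⟩ <;> rw [hl] <;> simp [hviol.1, hviol.2]
      · by_cases ha : a = '0' <;> by_cases hb : b = '0'
        · simp [decode_hdb3, decode_hdb3_alt, hl, ha, hb, PySem.List.enumerate_cons,
            PySem.List.enumerate_nil, decode_hdb3_step, decode_hdb3_alt_viol_step,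
            PySem.List.pySetD, PySem.List.pySet?, PySem.List.pyIdx?,
            PySem.List.pyGetD, PySem.List.pyGet?]
        · simp [decode_hdb3, decode_hdb3_alt, hl, ha, hb, PySem.List.enumerate_cons,
            PySem.List.enumerate_nil, decode_hdb3_step, decode_hdb3_alt_viol_step,
            PySem.List.pySetD, PySem.List.pySet?, PySem.List.pyIdx?,
            PySem.List.pyGetD, PySem.List.pyGet?]
        · simp [decode_hdb3, decode_hdb3_alt, hl, ha, hb, PySem.List.enumerate_cons,
            PySem.List.enumerate_nil, decode_hdb3_step, decode_hdb3_alt_viol_step,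
            PySem.List.pySetD, PySem.List.pySet?, PySem.List.pyIdx?,
            PySem.List.pyGetD, PySem.List.pyGet?]
        · have hba : b ≠ a := fun hba => hviol ⟨ha, hba⟩
          simp [decode_hdb3, decode_hdb3_alt, hl, ha, hb, hba, PySem.List.enumerate_cons,
            PySem.List.enumerate_nil, decode_hdb3_step, decode_hdb3_alt_viol_step,
            PySem.List.pySetD, PySem.List.pySet?, PySem.List.pyIdx?,
            PySem.List.pyGetD, PySem.List.pyGet?]
    · exfalso
      rw [hl] at h3
      simp at h3

theorem decode_hdb3_changed : Claim_changed_decode_hdb3 := by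
  unfold Claim_changed_decode_hdb3; decide

theorem decode_hdb3_tight : Claim_exact_decode_hdb3 := by
  intro s _ hD
  obtain ⟨hlen, heq, hne⟩ := hD
  rcases hl : s.toList with _ | ⟨a, _ | ⟨b, _ | ⟨c, t⟩⟩⟩ <;> rw [hl] at hlen heq hne <;>
    simp at hlen heq hne
  subst heq
  simp [decode_hdb3, decode_hdb3_alt, hl, hne, PySem.List.enumerate_cons,
    PySem.List.enumerate_nil, decode_hdb3_step, decode_hdb3_alt_viol_step,
    PySem.List.pySetD, PySem.List.pySet?, PySem.List.pyIdx?,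
    PySem.List.pyGetD, PySem.List.pyGet?]
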